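-- pv_equiv track=rewrite | github.com/penguinc00kies/CSC110-Jamie | csc110/tests/term_test_2/q1.py | decrypt_tt2
-- ===== SOURCE A (Python) =====
-- def reverse_number(num: int) -> int:
--     """Return the number with the order of its digits reversed"""
--     num_string = str(num)
--     reversed_num = ''
--     for char in num_string:
--         reversed_num = char + reversed_num
--     if reversed_num[-1] == '-':
--         reversed_num = reversed_num.strip('-')
--         reversed_num = '-' + reversed_num
--
--     return int(reversed_num)
--
-- def decrypt_tt2(k: int, ciphertext: list[tuple[int, int, int, int, int]]) \
--         -> list[tuple[int, int, int, int, int]]: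
--     """Return the plaintext grade message when ciphertext is decrypted with key k.
--
--     Preconditions:
--         - k and ciphertext are valid inputs for decryption, based on the cryptosystem description
--
--     >>> key = 10
--     >>> c = [(97, 93, 74, 5, 9)]
--     >>> decrypt_tt2(key, c)
--     [(78, 38, 46, 69, 1)]
--     """
--     plaintext = []
--     for grade_set in ciphertext:
--         plain_grade_set = ()
--
--         for grade in grade_set:
--             plain_grade_set = plain_grade_set + (reverse_number((grade - k) % 101), )
--         plaintext.append(plain_grade_set)
--
--     return plaintext
-- ===== SOURCE B (Python) =====
-- def decrypt_tt2(k: int, ciphertext: list[tuple[int, int, int, int, int]]) \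
--         -> list[tuple[int, int, int, int, int]]:
--     def dec(g: int) -> int:
--         n = (g - k) % 101
--         r = 0
--         while n > 0:
--             r = r * 10 + n % 10
--             n //= 10
--         return r
--     return [(dec(a), dec(b), dec(c), dec(d), dec(e)) for a, b, c, d, e in ciphertext]
-- ===== Notes on version B (the rewrite author's own statement) =====
-- stated objective: simpler
-- what changed: reverse_number's string build-reverse-strip-reparse (str, char-by-char prepend, strip('-'), int()) is replaced by a pure arithmetic digit-peeling loop (r = r*10 + n%10; n //= 10) inlined as a local helper, and the outer two loops building tuples by repeated concatenation become a single list comprehension with tuple unpacking.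
import Mathlib
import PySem

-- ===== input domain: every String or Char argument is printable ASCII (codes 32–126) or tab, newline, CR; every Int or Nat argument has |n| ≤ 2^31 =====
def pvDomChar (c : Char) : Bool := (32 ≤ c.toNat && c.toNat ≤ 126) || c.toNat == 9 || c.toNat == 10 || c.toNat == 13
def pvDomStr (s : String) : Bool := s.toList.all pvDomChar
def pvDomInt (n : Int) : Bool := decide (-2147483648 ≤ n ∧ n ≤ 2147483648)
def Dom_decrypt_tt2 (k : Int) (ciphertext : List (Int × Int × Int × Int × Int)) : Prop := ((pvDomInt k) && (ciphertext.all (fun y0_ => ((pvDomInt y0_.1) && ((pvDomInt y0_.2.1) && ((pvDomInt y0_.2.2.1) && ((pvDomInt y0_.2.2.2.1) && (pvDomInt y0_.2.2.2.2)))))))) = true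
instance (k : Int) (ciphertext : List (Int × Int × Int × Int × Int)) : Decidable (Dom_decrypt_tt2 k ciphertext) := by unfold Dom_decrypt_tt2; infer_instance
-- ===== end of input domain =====

-- B replaces A's string-based digit reversal (str / prepend loop / strip('-') / int()) by an
-- arithmetic digit-peeling loop and flattens the tuple-concatenation loops into a comprehension (simpler).

-- ===== PORT A =====
-- reverse_number: str(num); prepend each char; fix a trailing '-'; int() back.
-- int(reversed_num) never raises here (the string is always a valid integer literal), so .getD 0 is unreachable;
-- likewise str(num) is never empty, so pyGet? (-1) is always some.
def reverse_number (num : Int) : Int :=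
  let num_string : List Char := PySem.Int.toChars num
  let reversed_num : List Char := num_string.foldl (fun acc c => c :: acc) []
  let reversed_num : List Char :=
    if PySem.List.pyGet? reversed_num (-1) = some '-' then
      '-' :: PySem.Chars.stripChars reversed_num ['-']
    else reversed_num
  (PySem.Int.ofChars? reversed_num).getD 0

def decrypt_tt2 (k : Int) (ciphertext : List (Int × Int × Int × Int × Int)) : List (Int × Int × Int × Int × Int) :=
  ciphertext.foldl
    (fun plaintext gs =>
      plaintext ++ [(reverse_number (PySem.Int.mod (gs.1 - k) 101),
                     reverse_number (PySem.Int.mod (gs.2.1 - k) 101),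
                     reverse_number (PySem.Int.mod (gs.2.2.1 - k) 101),
                     reverse_number (PySem.Int.mod (gs.2.2.2.1 - k) 101),
                     reverse_number (PySem.Int.mod (gs.2.2.2.2 - k) 101))])
    []

-- ===== PORT B =====
-- while n > 0: r = r*10 + n%10; n //= 10 — fuel n.toNat+1 only makes the recursion structural
-- (each iteration strictly decreases n ≥ 0, so the fuel is never exhausted).
def pvRevLoop : Nat → Int → Int → Int
  | 0, _, r => r
  | fuel + 1, n, r =>
    if 0 < n then pvRevLoop fuel (PySem.Int.floordiv n 10) (r * 10 + PySem.Int.mod n 10)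
    else r

def pvDec (k g : Int) : Int :=
  let n := PySem.Int.mod (g - k) 101
  pvRevLoop (n.toNat + 1) n 0

def decrypt_tt2_alt (k : Int) (ciphertext : List (Int × Int × Int × Int × Int)) : List (Int × Int × Int × Int × Int) :=
  ciphertext.map (fun gs =>
    (pvDec k gs.1, pvDec k gs.2.1, pvDec k gs.2.2.1, pvDec k gs.2.2.2.1, pvDec k gs.2.2.2.2))

-- ===== PRECONDITION & SPEC =====
def Spec_decrypt_tt2 (k : Int) (ciphertext : List (Int × Int × Int × Int × Int)) (out : List (Int × Int × Int × Int × Int)) : Prop := out = decrypt_tt2_alt k ciphertext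
instance (k : Int) (ciphertext : List (Int × Int × Int × Int × Int)) (out : List (Int × Int × Int × Int × Int)) : Decidable (Spec_decrypt_tt2 k ciphertext out) := by unfold Spec_decrypt_tt2; infer_instance

-- ===== CLAIM (what is proved, stated in full; the proofs are below) =====
def Claim_equal_decrypt_tt2 : Prop := ∀ (k : Int) (ciphertext : List (Int × Int × Int × Int × Int)), Dom_decrypt_tt2 k ciphertext → Spec_decrypt_tt2 k ciphertext (decrypt_tt2 k ciphertext)

-- ===== LEMMAS AND PROOFS =====

-- the two single-value pipelines agree on every residue 0..100
theorem pv_fin_check :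
    ∀ m ∈ List.range 101, reverse_number (m : Int) = pvRevLoop (m + 1) (m : Int) 0 := by
  decide

theorem pv_one (k g : Int) :
    reverse_number (PySem.Int.mod (g - k) 101) = pvDec k g := by
  unfold pvDec
  have h0 : (0:Int) ≤ PySem.Int.mod (g - k) 101 := PySem.Int.mod_nonneg _ (by norm_num)
  have h1 : PySem.Int.mod (g - k) 101 < 101 := PySem.Int.mod_lt _ (by norm_num)
  set n := PySem.Int.mod (g - k) 101 with hn
  have hm : n = ((n.toNat : Nat) : Int) := (Int.toNat_of_nonneg h0).symm
  have hlt : n.toNat < 101 := by omega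
  have key := pv_fin_check n.toNat (List.mem_range.mpr hlt)
  rw [hm]
  simpa only [Int.toNat_natCast] using key

theorem pv_foldl (f : (Int × Int × Int × Int × Int) → (Int × Int × Int × Int × Int))
    (ct : List (Int × Int × Int × Int × Int)) (acc : List (Int × Int × Int × Int × Int)) :
    ct.foldl (fun p gs => p ++ [f gs]) acc = acc ++ ct.map f := by
  induction ct generalizing acc with
  | nil => simp
  | cons x xs ih => simp [ih]

-- ===== VERDICT (by name: the statement is the Claim_ definition above) =====
theorem decrypt_tt2_spec : Claim_equal_decrypt_tt2 := by
  intro k ct _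
  unfold Spec_decrypt_tt2 decrypt_tt2 decrypt_tt2_alt
  rw [pv_foldl (fun gs =>
      (reverse_number (PySem.Int.mod (gs.1 - k) 101),
       reverse_number (PySem.Int.mod (gs.2.1 - k) 101),
       reverse_number (PySem.Int.mod (gs.2.2.1 - k) 101),
       reverse_number (PySem.Int.mod (gs.2.2.2.1 - k) 101),
       reverse_number (PySem.Int.mod (gs.2.2.2.2 - k) 101))) ct []]
  simp only [List.nil_append]
  exact List.map_congr_left (fun gs _ => by simp only [pv_one])
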